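-- pv_equiv track=rewrite | github.com/GANJINAVEEN14161416/Leetcode_DSA | Copy Set Bits in Range - GFG/copy-set-bits-in-range.py | setSetBit
-- ===== SOURCE A (Python) =====
-- def setSetBit(x, y, l, r):
--     # code here
--     if (l < 1 or r > 32):
--         return x;
--
-- # Traverse in given range
--     for i in range(l, r + 1):
--
--         # Find a mask (A number whose
--         # only set bit is at i'th position)
--         mask = 1 << (i - 1);
--
--         # If i'th bit is set in y, set i'th
--         # bit in x also.
--         if ((y & mask) != 0):
--             x = x | mask;
--     return x
-- ===== SOURCE B (Python) =====
-- def setSetBit(x, y, l, r):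
--     # Single-mask re-implementation: build one contiguous bit mask for the
--     # whole range [l, r] and OR the selected bits of y into x at once.
--     if l < 1 or r > 32:
--         return x
--     if r < l:
--         return x
--     mask = ((1 << (r - l + 1)) - 1) << (l - 1)
--     return x | (y & mask)
-- ===== Notes on version B (the rewrite author's own statement) =====
-- stated objective: simpler
-- what changed: Replaces the per-bit loop (per-iteration mask build, test and OR) by one closed-form contiguous mask ((1<<(r-l+1))-1)<<(l-1) and a single 'x | (y & mask)'; the empty range r < l returns x directly.
import Mathlib
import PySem

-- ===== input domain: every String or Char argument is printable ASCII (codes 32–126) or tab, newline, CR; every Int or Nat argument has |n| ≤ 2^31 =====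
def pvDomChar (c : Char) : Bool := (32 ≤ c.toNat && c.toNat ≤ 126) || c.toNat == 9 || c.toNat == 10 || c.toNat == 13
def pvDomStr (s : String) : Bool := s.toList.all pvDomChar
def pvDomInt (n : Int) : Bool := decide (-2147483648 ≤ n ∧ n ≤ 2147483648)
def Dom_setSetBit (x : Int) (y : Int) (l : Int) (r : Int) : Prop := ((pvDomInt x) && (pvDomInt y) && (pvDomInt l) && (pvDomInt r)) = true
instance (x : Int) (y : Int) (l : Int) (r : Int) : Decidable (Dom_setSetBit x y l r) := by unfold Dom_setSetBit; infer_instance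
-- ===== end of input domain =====

-- B replaces A's per-bit loop by one closed-form contiguous mask and a single OR (simpler).

-- ===== PORT A =====
-- literal port of A: guard, then a fold over range(l, r+1), testing and OR-ing one bit per step
-- (Int.shiftLeft takes the shift amount as a Nat; within the loop i ≥ 1 holds, so .toNat is exact)
def setSetBit (x : Int) (y : Int) (l : Int) (r : Int) : Int :=
  if l < 1 ∨ r > 32 then x
  else
    (PySem.List.pyRange l (r + 1) 1).foldl (fun acc i =>
      let mask := Int.shiftLeft 1 (i - 1).toNat
      if PySem.Int.band y mask ≠ 0 then PySem.Int.bor acc mask else acc) x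

-- ===== PORT B =====
-- literal port of Source B: same guard, empty-range early return, then one mask and one OR
def setSetBit_alt (x : Int) (y : Int) (l : Int) (r : Int) : Int :=
  if l < 1 ∨ r > 32 then x
  else if r < l then x
  else
    let mask := Int.shiftLeft ((Int.shiftLeft 1 (r - l + 1).toNat) - 1) (l - 1).toNat
    PySem.Int.bor x (PySem.Int.band y mask)

-- ===== PRECONDITION & SPEC =====
def Spec_setSetBit (x : Int) (y : Int) (l : Int) (r : Int) (out : Int) : Prop := out = setSetBit_alt x y l r
instance (x : Int) (y : Int) (l : Int) (r : Int) (out : Int) : Decidable (Spec_setSetBit x y l r out) := by unfold Spec_setSetBit; infer_instance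

-- ===== CLAIM (what is proved, stated in full; the proofs are below) =====
def Claim_equal_setSetBit : Prop := ∀ (x : Int) (y : Int) (l : Int) (r : Int), Dom_setSetBit x y l r → Spec_setSetBit x y l r (setSetBit x y l r)

-- ===== LEMMAS AND PROOFS =====

theorem pv_disj_lor_eq_add (a : Nat) : ∀ b : Nat, a &&& b = 0 → a ||| b = a + b := by
  induction a using Nat.binaryRec with
  | zero => intro b _; simp
  | bit ea a' ih =>
    intro b h
    induction b using Nat.bitCasesOn with
    | bit eb b' =>
      rw [Nat.land_bit, Nat.bit_eq_zero_iff] at h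
      rw [Nat.lor_bit, ih b' h.1, Nat.bit_val, Nat.bit_val, Nat.bit_val]
      cases ea <;> cases eb <;> simp_all <;> omega

theorem pv_sub_and_eq_ldiff (m z : Nat) : m - (m &&& z) = Nat.ldiff m z := by
  have hdisj : (m &&& z) &&& Nat.ldiff m z = 0 := by
    apply Nat.eq_of_testBit_eq
    intro i
    rw [Nat.testBit_land, Nat.testBit_land, Nat.testBit_ldiff]
    cases hm : m.testBit i <;> cases hz : z.testBit i <;> simp
  have hor : (m &&& z) ||| Nat.ldiff m z = m := by
    apply Nat.eq_of_testBit_eq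
    intro i
    rw [Nat.testBit_lor, Nat.testBit_land, Nat.testBit_ldiff]
    cases hm : m.testBit i <;> cases hz : z.testBit i <;> simp
  have := pv_disj_lor_eq_add _ _ hdisj
  omega

def pvBandAux (y : Int) (M : Nat) : Nat :=
  if 0 ≤ y then y.toNat &&& M else Nat.ldiff M (-y - 1).toNat

theorem pv_band_cast (y : Int) (M : Nat) :
    PySem.Int.band y (M : Int) = (pvBandAux y M : Int) := by
  by_cases h : 0 ≤ y
  · simp [PySem.Int.band, pvBandAux, h]
  · simp [PySem.Int.band, pvBandAux, h, pv_sub_and_eq_ldiff]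

theorem pv_bandAux_zero (y : Int) : pvBandAux y 0 = 0 := by
  unfold pvBandAux
  split
  · simp
  · apply Nat.eq_of_testBit_eq; intro i; rw [Nat.testBit_ldiff]; simp

theorem pv_bandAux_lor (y : Int) (M N : Nat) :
    pvBandAux y (M ||| N) = pvBandAux y M ||| pvBandAux y N := by
  unfold pvBandAux
  split
  · exact Nat.and_or_distrib_left _ _ _
  · apply Nat.eq_of_testBit_eq
    intro i
    rw [Nat.testBit_ldiff, Nat.testBit_lor, Nat.testBit_lor, Nat.testBit_ldiff, Nat.testBit_ldiff]
    cases M.testBit i <;> cases N.testBit i <;> simp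

theorem pv_bandAux_two_pow (y : Int) (k : Nat) :
    pvBandAux y (2 ^ k) = 0 ∨ pvBandAux y (2 ^ k) = 2 ^ k := by
  unfold pvBandAux
  split
  · rw [Nat.and_two_pow]
    cases (y.toNat.testBit k) <;> simp
  · by_cases hz : ((-y - 1).toNat).testBit k
    · left
      apply Nat.eq_of_testBit_eq
      intro i
      rw [Nat.testBit_ldiff, Nat.testBit_two_pow, Nat.zero_testBit]
      by_cases hik : k = i
      · subst hik; rw [hz]; simp
      · simp [hik]
    · right
      have hz' : ((-y - 1).toNat).testBit k = false := by
        revert hz; cases ((-y - 1).toNat).testBit k <;> simp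
      apply Nat.eq_of_testBit_eq
      intro i
      rw [Nat.testBit_ldiff, Nat.testBit_two_pow]
      by_cases hik : k = i
      · subst hik; rw [hz']; simp
      · simp [hik]

theorem pv_bor_neg (x : Int) (h : ¬ 0 ≤ x) (n : Nat) :
    PySem.Int.bor x (n : Int) = -((Nat.ldiff (-x - 1).toNat n : Nat) : Int) - 1 := by
  simp [PySem.Int.bor, h, pv_sub_and_eq_ldiff]

theorem pv_bor_bor_cast (x : Int) (m n : Nat) :
    PySem.Int.bor (PySem.Int.bor x (m : Int)) (n : Int) = PySem.Int.bor x ((m ||| n : Nat) : Int) := by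
  by_cases h : 0 ≤ x
  · simp [PySem.Int.bor, h, Int.toNat_natCast, Nat.lor_assoc]
  · rw [pv_bor_neg x h m, pv_bor_neg x h (m ||| n)]
    set w : Nat := (-x - 1).toNat with hw
    have hneg : ¬ (0 : Int) ≤ -((Nat.ldiff w m : Nat) : Int) - 1 := by omega
    rw [pv_bor_neg _ hneg n]
    have harg : (-(-((Nat.ldiff w m : Nat) : Int) - 1) - 1).toNat = Nat.ldiff w m := by omega
    rw [harg]
    have key : (w.ldiff m).ldiff n = w.ldiff (m ||| n) := by
      apply Nat.eq_of_testBit_eq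
      intro i
      rw [Nat.testBit_ldiff, Nat.testBit_ldiff, Nat.testBit_ldiff, Nat.testBit_lor]
      cases w.testBit i <;> cases m.testBit i <;> cases n.testBit i <;> simp
    rw [key]

theorem pv_natCast_shiftLeft (m n : Nat) : Int.shiftLeft (m : Int) n = ((m * 2 ^ n : Nat) : Int) := by
  show ((m <<< n : Nat) : Int) = _
  rw [Nat.shiftLeft_eq]

theorem pv_one_shiftLeft (n : Nat) : Int.shiftLeft 1 n = ((2 ^ n : Nat) : Int) := by
  have := pv_natCast_shiftLeft 1 n
  simpa using this

theorem pv_step_eq (y a : Int) (i : Int) :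
    (if PySem.Int.band y (Int.shiftLeft 1 (i - 1).toNat) ≠ 0
      then PySem.Int.bor a (Int.shiftLeft 1 (i - 1).toNat) else a)
      = PySem.Int.bor a ((pvBandAux y (2 ^ (i - 1).toNat) : Nat) : Int) := by
  simp only [pv_one_shiftLeft, pv_band_cast]
  rcases pv_bandAux_two_pow y ((i - 1).toNat) with h | h <;> rw [h] <;> simp

theorem pv_loop_eq (x y l : Int) (hl : 1 ≤ l) (k : Nat) :
    ((List.range k).map (fun (j : Nat) => l + (j : Int))).foldl
      (fun acc i =>
        let mask := Int.shiftLeft 1 (i - 1).toNat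
        if PySem.Int.band y mask ≠ 0 then PySem.Int.bor acc mask else acc) x
      = PySem.Int.bor x ((pvBandAux y ((2 ^ k - 1) * 2 ^ (l - 1).toNat) : Nat) : Int) := by
  induction k with
  | zero => simp [pv_bandAux_zero]
  | succ k ih =>
    rw [List.range_succ, List.map_append, List.foldl_append, ih]
    simp only [List.map_cons, List.map_nil, List.foldl_cons, List.foldl_nil]
    rw [pv_step_eq, pv_bor_bor_cast]
    congr 2
    have hidx : (l + (k : Int) - 1).toNat = (l - 1).toNat + k := by omega
    rw [hidx, ← pv_bandAux_lor]
    congr 1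
    have hpos : 0 < (2 : Nat) ^ k := Nat.two_pow_pos _
    have hposs : 0 < (2 : Nat) ^ (l - 1).toNat := Nat.two_pow_pos _
    have hlt : (2 ^ k - 1) * 2 ^ (l - 1).toNat < 2 ^ ((l - 1).toNat + k) := by
      have h2 : 2 ^ k - 1 < 2 ^ k := by omega
      calc (2 ^ k - 1) * 2 ^ (l - 1).toNat
          < 2 ^ k * 2 ^ (l - 1).toNat := (Nat.mul_lt_mul_right hposs).mpr h2
        _ = 2 ^ ((l - 1).toNat + k) := by ring
    have hdisj : (2 ^ k - 1) * 2 ^ (l - 1).toNat &&& 2 ^ ((l - 1).toNat + k) = 0 := by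
      rw [Nat.and_two_pow, Nat.testBit_eq_false_of_lt hlt]
      simp
    rw [pv_disj_lor_eq_add _ _ hdisj]
    have h3 : (2 : Nat) ^ ((l - 1).toNat + k) = 2 ^ (l - 1).toNat * 2 ^ k := by ring
    have h2 : (2 : Nat) ^ (k + 1) = 2 * 2 ^ k := by ring
    rw [h2, h3]
    obtain ⟨c, hc⟩ := Nat.exists_eq_add_of_lt hpos
    rw [show (2 : Nat) ^ k = c + 1 by omega]
    rw [show c + 1 - 1 = c from rfl, show 2 * (c + 1) - 1 = 2 * c + 1 by omega]
    ring

-- ===== VERDICT (by name: the statement is the Claim_ definition above) =====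
theorem setSetBit_spec : Claim_equal_setSetBit := by
  unfold Claim_equal_setSetBit
  intro x y l r _
  unfold Spec_setSetBit
  unfold setSetBit setSetBit_alt
  by_cases hg : l < 1 ∨ r > 32
  · simp [hg]
  · rw [if_neg hg, if_neg hg]
    have hl : 1 ≤ l := by omega
    by_cases hrl : r < l
    · rw [if_pos hrl]
      have he : PySem.List.pyRange l (r + 1) 1 = [] := by
        rw [PySem.List.pyRange_one]
        have h0 : (r + 1 - l).toNat = 0 := by omega
        simp [h0]
      simp [he]
    · rw [if_neg hrl]
      set k : Nat := (r - l).toNat with hkdef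
      have hrange : PySem.List.pyRange l (r + 1) 1
          = (List.range (k + 1)).map (fun (j : Nat) => l + (j : Int)) := by
        rw [PySem.List.pyRange_one]
        have h1 : (r + 1 - l).toNat = k + 1 := by omega
        rw [h1]
      rw [hrange, pv_loop_eq x y l hl (k + 1)]
      have hw : (r - l + 1).toNat = k + 1 := by omega
      have hmask : Int.shiftLeft ((Int.shiftLeft 1 (r - l + 1).toNat) - 1) (l - 1).toNat
          = (((2 ^ (k + 1) - 1) * 2 ^ (l - 1).toNat : Nat) : Int) := by
        rw [hw, pv_one_shiftLeft]
        have h1 : ((2 ^ (k + 1) : Nat) : Int) - 1 = (((2 ^ (k + 1) - 1 : Nat)) : Int) := by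
          have : 1 ≤ 2 ^ (k + 1) := Nat.one_le_two_pow
          omega
        rw [h1, pv_natCast_shiftLeft]
      rw [hmask]
      simp only [pv_band_cast]
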